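-- pv_equiv track=rewrite | github.com/BenPali/LegacyProject | modernProject/lib/name.py | abbrev
-- ===== SOURCE A (Python) =====
-- from typing import List, Tuple, Optional, Callable
--
-- ABBREV_LIST = [
--     ("a", None),
--     ("af", None),
--     ("d", None),
--     ("de", None),
--     ("di", None),
--     ("ier", "i"),
--     ("of", None),
--     ("saint", "st"),
--     ("sainte", "ste"),
--     ("van", None),
--     ("von", None),
--     ("zu", None),
--     ("zur", None),
-- ]
--
-- def _is_word(s: str, i: int, p: str) -> bool:
--     if i + len(p) > len(s):
--         return False
--     if s[i:i+len(p)] != p: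
--         return False
--     end_pos = i + len(p)
--     if end_pos == len(s):
--         return True
--     return s[end_pos] == ' '
--
-- def _search_abbrev(s: str, i: int) -> Optional[Tuple[int, Optional[str]]]:
--     for word, abbr in ABBREV_LIST:
--         if _is_word(s, i, word):
--             return (len(word), abbr)
--     return None
--
-- def abbrev(s: str) -> str:
--     result = []
--     can_start_abbrev = True
--     i = 0
--     while i < len(s):
--         if s[i] == ' ':
--             result.append(' ')
--             can_start_abbrev = True
--             i += 1
--         elif can_start_abbrev:
--             match = _search_abbrev(s, i)
--             if match:
--                 n, a = match
--                 if a: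
--                     result.append(a)
--                 can_start_abbrev = a is None
--                 i += n + (1 if a is None else 0)
--             else:
--                 result.append(s[i])
--                 can_start_abbrev = False
--                 i += 1
--         else:
--             result.append(s[i])
--             i += 1
--     return ''.join(result)
-- ===== SOURCE B (Python) =====
-- ABBREV_LIST = [
--     ("a", None),
--     ("af", None),
--     ("d", None),
--     ("de", None),
--     ("di", None),
--     ("ier", "i"),
--     ("of", None),
--     ("saint", "st"),
--     ("sainte", "ste"),
--     ("van", None),
--     ("von", None),
--     ("zu", None),
--     ("zur", None),
-- ]
--
-- def abbrev(s: str) -> str: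
--     # Token-based: split on ' ', rewrite each token via a dict, suppress the
--     # separator after a None-abbreviation particle (it eats its trailing space).
--     d = dict(ABBREV_LIST)
--     pieces = []
--     first = True
--     prev_none = False
--     for tok in s.split(' '):
--         if not first and not prev_none:
--             pieces.append(' ')
--         first = False
--         if tok in d:
--             ab = d[tok]
--             if ab is None:
--                 prev_none = True
--             else:
--                 pieces.append(ab)
--                 prev_none = False
--         else:
--             pieces.append(tok)
--             prev_none = False
--     return ''.join(pieces)
-- ===== Notes on version B (the rewrite author's own statement) =====
-- stated objective: faster
-- what changed: A scans character by character with a can_start_abbrev flag, re-matching every ABBREV_LIST word at each word start; B splits the string on the space character once, rewrites each token by one dict lookup, and joins the pieces, suppressing the separator after a None-abbreviation particle (which eats its trailing space).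
import Mathlib
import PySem

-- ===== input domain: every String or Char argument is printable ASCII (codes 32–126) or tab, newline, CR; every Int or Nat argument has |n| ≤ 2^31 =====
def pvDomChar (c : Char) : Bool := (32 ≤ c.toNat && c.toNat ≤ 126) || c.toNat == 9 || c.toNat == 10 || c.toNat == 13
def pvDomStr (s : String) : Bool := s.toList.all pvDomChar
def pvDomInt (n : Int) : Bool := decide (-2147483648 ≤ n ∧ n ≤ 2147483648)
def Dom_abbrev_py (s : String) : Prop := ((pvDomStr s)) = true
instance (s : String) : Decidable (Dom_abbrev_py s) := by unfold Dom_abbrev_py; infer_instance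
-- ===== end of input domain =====

-- B re-implements the char-scanning abbreviator as a split-on-space token rewrite
-- (one dict lookup per token, separator suppressed after a None-abbreviation particle);
-- measurably faster (one pass + hash lookups instead of per-position word scans), same values everywhere.

-- ===== PORT A =====
-- ABBREV_LIST, as lists of chars
def pvAbbrevList : List (List Char × Option (List Char)) :=
  [ (['a'], none), (['a','f'], none), (['d'], none), (['d','e'], none), (['d','i'], none),
    (['i','e','r'], some ['i']), (['o','f'], none),
    (['s','a','i','n','t'], some ['s','t']), (['s','a','i','n','t','e'], some ['s','t','e']),
    (['v','a','n'], none), (['v','o','n'], none), (['z','u'], none), (['z','u','r'], none) ]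

-- _is_word(s, i, p): s[i:i+len(p)] == p and the match ends at a space or at the end
def pvIsWord (s : List Char) (i : Nat) (p : List Char) : Bool :=
  if i + p.length > s.length then false
  else if (s.drop i).take p.length ≠ p then false
  else if i + p.length = s.length then true
  else s[i + p.length]? == some ' '

-- _search_abbrev: first entry of ABBREV_LIST matching as a whole word at i
def pvSearchAux (s : List Char) (i : Nat) :
    List (List Char × Option (List Char)) → Option (Nat × Option (List Char))
  | [] => none
  | (w, ab) :: rest => if pvIsWord s i w then some (w.length, ab) else pvSearchAux s i rest

def pvSearchAbbrev (s : List Char) (i : Nat) : Option (Nat × Option (List Char)) :=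
  pvSearchAux s i pvAbbrevList

-- the main while-loop of abbrev: state (result, can_start_abbrev, i); the fuel
-- argument (= length of the string at the call) only makes the recursion structural,
-- it is never exhausted while i < len(s)
def pvAbbrevLoop (s : List Char) (fuel : Nat) (i : Nat) (canStart : Bool) (result : List Char) : List Char :=
  match fuel with
  | 0 => result
  | fuel + 1 =>
    if h : i < s.length then
      if s[i] = ' ' then
        pvAbbrevLoop s fuel (i + 1) true (result ++ [' '])
      else if canStart then
        match pvSearchAbbrev s i with
        | some (n, a) =>
            pvAbbrevLoop s fuel (i + (n + (if a.isNone then 1 else 0))) a.isNone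
              (match a with
               | some ab => if ab ≠ [] then result ++ ab else result
               | none => result)
        | none => pvAbbrevLoop s fuel (i + 1) false (result ++ [s[i]])
      else
        pvAbbrevLoop s fuel (i + 1) false (result ++ [s[i]])
    else result

def abbrev_py (s : String) : String := String.ofList (pvAbbrevLoop s.toList s.toList.length 0 true [])

-- ===== PORT B =====
-- dict(ABBREV_LIST) lookup (keys distinct, so first match = dict lookup)
def pvDictGet? (tok : List Char) :
    List (List Char × Option (List Char)) → Option (Option (List Char))
  | [] => none
  | (w, ab) :: rest => if w = tok then some ab else pvDictGet? tok rest

-- s.split(' '): split on each single space, keeping empty tokens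
def pvSplitSp : List Char → List (List Char)
  | [] => [[]]
  | c :: t =>
    if c = ' ' then [] :: pvSplitSp t
    else
      match pvSplitSp t with
      | tok :: toks => (c :: tok) :: toks
      | [] => [[c]]

-- the token loop of B: flags first / prev_none, accumulator of chars
def pvBLoop : List (List Char) → Bool → Bool → List Char → List Char
  | [], _, _, acc => acc
  | tok :: rest, first, prevNone, acc =>
    let acc1 := if !first && !prevNone then acc ++ [' '] else acc
    match pvDictGet? tok pvAbbrevList with
    | some none => pvBLoop rest false true acc1
    | some (some ab) => pvBLoop rest false false (acc1 ++ ab)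
    | none => pvBLoop rest false false (acc1 ++ tok)

def abbrev_py_alt (s : String) : String :=
  String.ofList (pvBLoop (pvSplitSp s.toList) true false [])

-- ===== PRECONDITION & SPEC =====
def Spec_abbrev_py (s : String) (out : String) : Prop := out = abbrev_py_alt s
instance (s : String) (out : String) : Decidable (Spec_abbrev_py s out) := by unfold Spec_abbrev_py; infer_instance

-- ===== CLAIM (what is proved, stated in full; the proofs are below) =====
def Claim_equal_abbrev_py : Prop := ∀ (s : String), Dom_abbrev_py s → Spec_abbrev_py s (abbrev_py s)

-- ===== LEMMAS AND PROOFS =====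

-- every key of ABBREV_LIST is a nonempty word (progress of the scan loop)
theorem pvSearchAux_pos {s : List Char} {i : Nat} {l : List (List Char × Option (List Char))}
    {n : Nat} {a : Option (List Char)}
    (hl : ∀ p ∈ l, p.1 ≠ []) (h : pvSearchAux s i l = some (n, a)) : 1 ≤ n := by
  induction l with
  | nil => simp [pvSearchAux] at h
  | cons p rest ih =>
    obtain ⟨w, ab⟩ := p
    simp only [pvSearchAux] at h
    split at h
    · simp only [Option.some.injEq, Prod.mk.injEq] at h
      obtain ⟨h1, h2⟩ := h
      have hw : w ≠ [] := hl (w, ab) (by simp)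
      cases w with
      | nil => exact absurd rfl hw
      | cons c cs => simp only [List.length_cons] at h1; omega
    · exact ih (fun q hq => hl q (List.mem_cons_of_mem _ hq)) h

theorem pvAbbrevList_keys_ne_nil : ∀ p ∈ pvAbbrevList, p.1 ≠ [] := by decide


-- suffix-based restatement of A's loop (i replaced by the suffix s.drop i)
def pvIsWordAt (t p : List Char) : Bool :=
  if t.length < p.length then false
  else if t.take p.length ≠ p then false
  else if p.length = t.length then true
  else t[p.length]? == some ' '

def pvSearchAtAux (t : List Char) :
    List (List Char × Option (List Char)) → Option (Nat × Option (List Char))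
  | [] => none
  | (w, ab) :: rest => if pvIsWordAt t w then some (w.length, ab) else pvSearchAtAux t rest

def pvSearchAt (t : List Char) : Option (Nat × Option (List Char)) :=
  pvSearchAtAux t pvAbbrevList

theorem pvSearchAtAux_pos {t : List Char} {l : List (List Char × Option (List Char))}
    {n : Nat} {a : Option (List Char)}
    (hl : ∀ p ∈ l, p.1 ≠ []) (h : pvSearchAtAux t l = some (n, a)) : 1 ≤ n := by
  induction l with
  | nil => simp [pvSearchAtAux] at h
  | cons p rest ih =>
    obtain ⟨w, ab⟩ := p
    simp only [pvSearchAtAux] at h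
    split at h
    · simp only [Option.some.injEq, Prod.mk.injEq] at h
      obtain ⟨h1, h2⟩ := h
      have hw : w ≠ [] := hl (w, ab) (by simp)
      cases w with
      | nil => exact absurd rfl hw
      | cons c cs => simp only [List.length_cons] at h1; omega
    · exact ih (fun q hq => hl q (List.mem_cons_of_mem _ hq)) h

def pvLoop' : List Char → Bool → List Char → List Char
  | [], _, r => r
  | c :: u, canStart, r =>
    if c = ' ' then pvLoop' u true (r ++ [' '])
    else if canStart then
      match hm : pvSearchAt (c :: u) with
      | some (n, a) =>
          pvLoop' ((c :: u).drop (n + (if a.isNone then 1 else 0))) a.isNone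
            (match a with
             | some ab => if ab ≠ [] then r ++ ab else r
             | none => r)
      | none => pvLoop' u false (r ++ [c])
    else pvLoop' u false (r ++ [c])
termination_by t _ _ => t.length
decreasing_by
  · simp
  · have := pvSearchAtAux_pos pvAbbrevList_keys_ne_nil hm
    simp [List.length_drop]; omega
  · simp
  · simp

-- bridges: index form = suffix form
theorem pvIsWord_eq (s : List Char) (i : Nat) (p : List Char) (hi : i ≤ s.length) :
    pvIsWord s i p = pvIsWordAt (s.drop i) p := by
  unfold pvIsWord pvIsWordAt
  rw [List.length_drop, List.getElem?_drop]
  split_ifs <;> first | rfl | omega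

theorem pvSearchAux_eq (s : List Char) (i : Nat) (hi : i ≤ s.length)
    (l : List (List Char × Option (List Char))) :
    pvSearchAux s i l = pvSearchAtAux (s.drop i) l := by
  induction l with
  | nil => rfl
  | cons p rest ih =>
    obtain ⟨w, ab⟩ := p
    simp only [pvSearchAux, pvSearchAtAux, pvIsWord_eq s i w hi, ih]

theorem pvSearch_eq (s : List Char) (i : Nat) (hi : i ≤ s.length) :
    pvSearchAbbrev s i = pvSearchAt (s.drop i) := pvSearchAux_eq s i hi pvAbbrevList

theorem pvLoop'_step (c : Char) (u : List Char) (hc : ¬ c = ' ') (r : List Char) :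
    pvLoop' (c :: u) true r =
      match pvSearchAt (c :: u) with
      | some (n, a) =>
          pvLoop' ((c :: u).drop (n + if a.isNone then 1 else 0)) a.isNone
            (match a with
             | some ab => if ab ≠ [] then r ++ ab else r
             | none => r)
      | none => pvLoop' u false (r ++ [c]) := by
  rw [pvLoop', if_neg hc, if_pos rfl]
  split
  · rename_i n a heq
    simp only [heq]
    cases a <;> rfl
  · rename_i heq
    simp only [heq]

theorem pvAbbrevLoop_step (s : List Char) (fuel i : Nat) (hi : i < s.length)
    (hsp : ¬ s[i] = ' ') (r : List Char) :
    pvAbbrevLoop s (fuel + 1) i true r =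
      match pvSearchAbbrev s i with
      | some (n, a) =>
          pvAbbrevLoop s fuel (i + (n + if a.isNone then 1 else 0)) a.isNone
            (match a with
             | some ab => if ab ≠ [] then r ++ ab else r
             | none => r)
      | none => pvAbbrevLoop s fuel (i + 1) false (r ++ [s[i]]) := by
  rw [pvAbbrevLoop, dif_pos hi, if_neg hsp, if_pos rfl]

theorem pvAbbrevLoop_eq_aux (fuel : Nat) : ∀ (s : List Char) (i : Nat) (c : Bool) (r : List Char),
    s.length - i ≤ fuel → pvAbbrevLoop s fuel i c r = pvLoop' (s.drop i) c r := by
  induction fuel with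
  | zero =>
    intro s i c r h
    rw [pvAbbrevLoop, List.drop_eq_nil_of_le (by omega), pvLoop']
  | succ k ih =>
    intro s i c r h
    by_cases hi : i < s.length
    · have hdrop : s.drop i = s[i] :: s.drop (i + 1) := (List.getElem_cons_drop hi).symm
      by_cases hsp : s[i] = ' '
      · rw [pvAbbrevLoop, dif_pos hi, hdrop, pvLoop', if_pos hsp, if_pos hsp,
            ih s (i+1) true (r ++ [' ']) (by omega)]
      · cases c with
        | false =>
          rw [pvAbbrevLoop, dif_pos hi, hdrop, pvLoop', if_neg hsp, if_neg hsp]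
          simp only [Bool.false_eq_true, if_neg not_false]
          rw [ih s (i+1) false (r ++ [s[i]]) (by omega)]
        | true =>
          have hse : pvSearchAt (s[i] :: s.drop (i + 1)) = pvSearchAbbrev s i := by
            rw [← hdrop, ← pvSearch_eq s i (by omega)]
          rw [pvAbbrevLoop_step s k i hi hsp r, hdrop,
            pvLoop'_step s[i] (s.drop (i+1)) hsp r, hse]
          rcases hmA : pvSearchAbbrev s i with _ | ⟨n, a⟩
          · exact ih s (i+1) false (r ++ [s[i]]) (by omega)
          · have hn1 : 1 ≤ n := pvSearchAux_pos pvAbbrevList_keys_ne_nil hmA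
            cases a with
            | none =>
              show pvAbbrevLoop s k (i + (n + 1)) true r
                  = pvLoop' ((s[i] :: s.drop (i+1)).drop (n + 1)) true r
              have hdd : (s[i] :: s.drop (i+1)).drop (n + 1) = s.drop (i + (n + 1)) := by
                rw [← hdrop, List.drop_drop, Nat.add_comm]
              rw [hdd]
              exact ih s _ _ _ (by omega)
            | some ab =>
              show pvAbbrevLoop s k (i + (n + 0)) false (if ab ≠ [] then r ++ ab else r)
                  = pvLoop' ((s[i] :: s.drop (i+1)).drop (n + 0)) false (if ab ≠ [] then r ++ ab else r)
              have hdd : (s[i] :: s.drop (i+1)).drop (n + 0) = s.drop (i + (n + 0)) := by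
                rw [← hdrop, List.drop_drop, Nat.add_comm]
              rw [hdd]
              exact ih s _ _ _ (by omega)
    · rw [pvAbbrevLoop, dif_neg hi, List.drop_eq_nil_of_le (by omega), pvLoop']

theorem pvAbbrevLoop_eq (s : List Char) (c : Bool) (r : List Char) :
    pvAbbrevLoop s s.length 0 c r = pvLoop' s c r := by
  have h := pvAbbrevLoop_eq_aux s.length s 0 c r (by omega)
  rwa [List.drop_zero] at h

-- token model
def pvF (tok : List Char) : List Char :=
  match pvDictGet? tok pvAbbrevList with
  | some none => []
  | some (some ab) => ab
  | none => tok

def pvM : List (List Char) → List Char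
  | [] => []
  | [tok] => pvF tok
  | tok :: rest =>
      pvF tok ++ (if pvDictGet? tok pvAbbrevList = some none then [] else [' ']) ++ pvM rest

theorem pvBLoop_char (toks : List (List Char)) :
    (∀ acc, pvBLoop toks true false acc = acc ++ pvM toks)
    ∧ (∀ acc, pvBLoop toks false true acc = acc ++ pvM toks)
    ∧ (toks ≠ [] → ∀ acc, pvBLoop toks false false acc = acc ++ ' ' :: pvM toks) := by
  induction toks with
  | nil =>
    exact ⟨fun acc => by simp [pvBLoop, pvM], fun acc => by simp [pvBLoop, pvM],
           fun h => absurd rfl h⟩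
  | cons tok rest ih =>
    obtain ⟨ih1, ih2, ih3⟩ := ih
    have hflag : ∀ (first prevNone : Bool) (acc : List Char),
        pvBLoop (tok :: rest) first prevNone acc
          = pvBLoop (tok :: rest) false true
              (if (!first && !prevNone) = true then acc ++ [' '] else acc) := by
      intro f p acc
      cases f <;> cases p <;> simp [pvBLoop]
    have base : ∀ acc, pvBLoop (tok :: rest) false true acc = acc ++ pvM (tok :: rest) := by
      intro acc
      simp only [pvBLoop, Bool.not_false, Bool.not_true, Bool.and_false]
      rcases hd : pvDictGet? tok pvAbbrevList with _ | ab
      · rcases rest with _ | ⟨x, xs⟩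
        · simp [pvBLoop, pvM, pvF, hd]
        · show pvBLoop (x :: xs) false false (acc ++ tok) = acc ++ pvM (tok :: x :: xs)
          rw [ih3 (by simp)]
          simp [pvM, pvF, hd]
      · rcases ab with _ | ab
        · rcases rest with _ | ⟨x, xs⟩
          · simp [pvBLoop, pvM, pvF, hd]
          · show pvBLoop (x :: xs) false true acc = acc ++ pvM (tok :: x :: xs)
            rw [ih2]
            simp [pvM, pvF, hd]
        · rcases rest with _ | ⟨x, xs⟩
          · simp [pvBLoop, pvM, pvF, hd]
          · show pvBLoop (x :: xs) false false (acc ++ ab) = acc ++ pvM (tok :: x :: xs)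
            rw [ih3 (by simp)]
            simp [pvM, pvF, hd]
    refine ⟨fun acc => ?_, base, fun _ acc => ?_⟩
    · rw [hflag true false acc]
      simpa using base acc
    · rw [hflag false false acc]
      simpa using base (acc ++ [' '])

theorem pvSplitSp_ne_nil (t : List Char) : pvSplitSp t ≠ [] := by
  cases t with
  | nil => simp [pvSplitSp]
  | cons c t =>
    by_cases hc : c = ' '
    · simp [pvSplitSp, hc]
    · rcases h : pvSplitSp t with _ | ⟨a, b⟩ <;> simp [pvSplitSp, hc, h]

theorem pvSplitSp_append (tok : List Char) (h : ∀ c ∈ tok, ¬ c = ' ') (rest : List Char) :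
    pvSplitSp (tok ++ ' ' :: rest) = tok :: pvSplitSp rest := by
  induction tok with
  | nil => simp [pvSplitSp]
  | cons c tk ih =>
    have hc : ¬ c = ' ' := h c (by simp)
    have ih' := ih (fun d hd => h d (by simp [hd]))
    simp [pvSplitSp, hc, ih']

theorem pvSplitSp_no_space (t : List Char) (h : ∀ c ∈ t, ¬ c = ' ') : pvSplitSp t = [t] := by
  induction t with
  | nil => simp [pvSplitSp]
  | cons c tk ih =>
    have hc := h c (by simp)
    simp [pvSplitSp, hc, ih (fun d hd => h d (by simp [hd]))]

theorem pvLoop'_copy (tok : List Char) (h : ∀ c ∈ tok, ¬ c = ' ') :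
    ∀ (u r : List Char), pvLoop' (tok ++ u) false r = pvLoop' u false (r ++ tok) := by
  induction tok with
  | nil => intro u r; simp
  | cons c tk ih =>
    intro u r
    have hc := h c (by simp)
    rw [List.cons_append, pvLoop', if_neg hc]
    simp only [Bool.false_eq_true, if_neg not_false]
    rw [ih (fun d hd => h d (by simp [hd])) u (r ++ [c])]
    simp

theorem pvIsWordAt_iff (t p : List Char) :
    pvIsWordAt t p = true ↔
      p.length ≤ t.length ∧ t.take p.length = p ∧
        (p.length = t.length ∨ t[p.length]? = some ' ') := by
  unfold pvIsWordAt
  split_ifs with h1 h2 h3 <;> simp_all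

theorem pvIsWordAt_token (tok u w : List Char) (htok : tok ≠ [])
    (hts : ∀ c ∈ tok, ¬ c = ' ') (hws : ∀ c ∈ w, ¬ c = ' ')
    (hu : u = [] ∨ ∃ v, u = ' ' :: v) :
    (pvIsWordAt (tok ++ u) w = true) ↔ w = tok := by
  rw [pvIsWordAt_iff]
  constructor
  · rintro ⟨h1, h2, h3⟩
    rcases Nat.lt_trichotomy w.length tok.length with hlt | heq | hgt
    · exfalso
      rcases h3 with h3 | h3
      · rw [List.length_append] at h3; omega
      · rw [List.getElem?_append_left hlt, List.getElem?_eq_getElem hlt] at h3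
        have : tok[w.length] ∈ tok := List.getElem_mem hlt
        exact hts _ this (by injection h3)
    · rw [List.take_append_of_le_length (le_of_eq heq)] at h2
      rw [heq, List.take_of_length_le le_rfl] at h2
      exact h2.symm
    · exfalso
      rcases hu with rfl | ⟨v, rfl⟩
      · simp at h1; omega
      · have hsp : (tok ++ ' ' :: v)[tok.length]? = some ' ' := by
          rw [List.getElem?_append_right le_rfl]; simp
        have hw : w[tok.length]? = some ' ' := by
          rw [← h2, List.getElem?_take_of_lt hgt, hsp]
        exact hws ' ' (List.mem_of_getElem? hw) rfl
  · rintro rfl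
    refine ⟨by rw [List.length_append]; omega, List.take_left, ?_⟩
    rcases hu with rfl | ⟨v, rfl⟩
    · left; simp
    · right
      rw [List.getElem?_append_right le_rfl]; simp

theorem pvAbbrevList_keys_words :
    ∀ p ∈ pvAbbrevList, p.1 ≠ [] ∧ ∀ c ∈ p.1, ¬ c = ' ' := by
  intro p hp
  fin_cases hp <;> exact ⟨by simp, by simp⟩

theorem pvSearchAtAux_token (tok u : List Char) (htok : tok ≠ [])
    (hts : ∀ c ∈ tok, ¬ c = ' ') (hu : u = [] ∨ ∃ v, u = ' ' :: v)
    (l : List (List Char × Option (List Char)))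
    (hkeys : ∀ p ∈ l, p.1 ≠ [] ∧ ∀ c ∈ p.1, ¬ c = ' ') :
    pvSearchAtAux (tok ++ u) l
      = (pvDictGet? tok l).map (fun ab => (tok.length, ab)) := by
  induction l with
  | nil => rfl
  | cons p rest ih =>
    obtain ⟨w, ab⟩ := p
    have hw := hkeys (w, ab) (by simp)
    have hiff := pvIsWordAt_token tok u w htok hts hw.2 hu
    by_cases hwt : w = tok
    · subst hwt
      rw [pvSearchAtAux, if_pos (hiff.mpr rfl)]
      simp [pvDictGet?]
    · have : pvIsWordAt (tok ++ u) w ≠ true := fun hh => hwt (hiff.mp hh)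
      rw [pvSearchAtAux, if_neg this, pvDictGet?, if_neg hwt,
        ih (fun q hq => hkeys q (List.mem_cons_of_mem _ hq))]

theorem pvDictGet?_mem {tok : List Char} {ab : Option (List Char)}
    {l : List (List Char × Option (List Char))}
    (h : pvDictGet? tok l = some ab) : (tok, ab) ∈ l := by
  induction l with
  | nil => simp [pvDictGet?] at h
  | cons p rest ih =>
    obtain ⟨w, v⟩ := p
    rw [pvDictGet?] at h
    split at h
    · rename_i hw
      subst hw
      obtain rfl := (Option.some.injEq _ _).mp h
      exact List.mem_cons_self ..
    · exact List.mem_cons_of_mem _ (ih h)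

theorem pvAbbrevList_val_ne_nil {tok ab : List Char}
    (h : pvDictGet? tok pvAbbrevList = some (some ab)) : ab ≠ [] := by
  have hm := pvDictGet?_mem h
  simp only [pvAbbrevList, List.mem_cons, List.not_mem_nil, or_false, Prod.mk.injEq] at hm
  rcases hm with ⟨_, h2⟩|⟨_, h2⟩|⟨_, h2⟩|⟨_, h2⟩|⟨_, h2⟩|⟨_, h2⟩|⟨_, h2⟩|⟨_, h2⟩|⟨_, h2⟩|⟨_, h2⟩|⟨_, h2⟩|⟨_, h2⟩|⟨_, h2⟩ <;>
    first
      | (obtain rfl := (Option.some.injEq _ _).mp h2; simp)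
      | exact absurd h2 (by simp)

theorem pvDrop_append (l₁ l₂ : List Char) (n : Nat) :
    (l₁ ++ l₂).drop (l₁.length + n) = l₂.drop n := by
  rw [List.drop_append]; simp

theorem pvLoop'_char_aux (k : Nat) : ∀ (t r : List Char), t.length ≤ k →
    pvLoop' t true r = r ++ pvM (pvSplitSp t) := by
  induction k with
  | zero =>
    intro t r h
    have ht : t = [] := List.length_eq_zero_iff.mp (by omega)
    subst ht
    rw [pvLoop']
    simp [pvSplitSp, pvM, pvF, pvDictGet?, pvAbbrevList]
  | succ k ih =>
    intro t r h
    cases t with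
    | nil =>
      rw [pvLoop']
      simp [pvSplitSp, pvM, pvF, pvDictGet?, pvAbbrevList]
    | cons c t' =>
      by_cases hc : c = ' '
      · subst hc
        rw [pvLoop', if_pos rfl, ih t' (r ++ [' ']) (by simp at h; omega)]
        rcases hsp : pvSplitSp t' with _ | ⟨x, xs⟩
        · exact absurd hsp (pvSplitSp_ne_nil t')
        · have hss : pvSplitSp (' ' :: t') = [] :: x :: xs := by simp [pvSplitSp, hsp]
          rw [hss]
          simp [pvM, pvF, pvDictGet?, pvAbbrevList]
      · obtain ⟨tk, u, hsplit', hts', hu⟩ :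
            ∃ tk u, tk ++ u = t' ∧ (∀ d ∈ tk, ¬ d = ' ')
              ∧ (u = [] ∨ ∃ v, u = ' ' :: v) := by
          refine ⟨t'.takeWhile (fun x => x != ' '), t'.dropWhile (fun x => x != ' '),
            List.takeWhile_append_dropWhile, ?_, ?_⟩
          · exact fun d hd => by simpa using List.mem_takeWhile_imp hd
          · rcases hue : t'.dropWhile (fun x => x != ' ') with _ | ⟨d, v⟩
            · exact Or.inl rfl
            · refine Or.inr ⟨v, ?_⟩
              have hne : t'.dropWhile (fun x => x != ' ') ≠ [] := by rw [hue]; simp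
              have hh := List.head_dropWhile_not (fun x => x != ' ') hne
              simp only [hue, List.head_cons] at hh
              simp at hh
              rw [hh]
        subst hsplit'
        have hts : ∀ d ∈ c :: tk, ¬ d = ' ' := by
          intro d hd
          rcases List.mem_cons.mp hd with rfl | hd
          · exact hc
          · exact hts' d hd
        have hct : c :: (tk ++ u) = (c :: tk) ++ u := by simp
        have hsearch : pvSearchAt (c :: (tk ++ u))
            = (pvDictGet? (c :: tk) pvAbbrevList).map (fun ab => ((c :: tk).length, ab)) := by
          rw [hct]
          exact pvSearchAtAux_token (c :: tk) u (by simp) hts hu pvAbbrevList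
            pvAbbrevList_keys_words
        rw [pvLoop'_step c (tk ++ u) hc r, hsearch]
        rcases hd : pvDictGet? (c :: tk) pvAbbrevList with _ | ab
        · -- ordinary token: copy it through
          simp only [Option.map_none]
          rw [pvLoop'_copy tk hts' u (r ++ [c])]
          rcases hu with rfl | ⟨v, rfl⟩
          · rw [pvLoop']
            have h1 : c :: (tk ++ []) = c :: tk := by simp
            rw [h1, pvSplitSp_no_space _ hts]
            simp [pvM, pvF, hd]
          · rw [pvLoop', if_pos rfl, ih v ((r ++ [c] ++ tk) ++ [' '])
              (by simp only [List.length_cons, List.length_append] at h; omega)]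
            have h1 : c :: (tk ++ ' ' :: v) = (c :: tk) ++ ' ' :: v := by simp
            rw [h1, pvSplitSp_append _ hts v]
            rcases hsv : pvSplitSp v with _ | ⟨x, xs⟩
            · exact absurd hsv (pvSplitSp_ne_nil v)
            · simp [pvM, pvF, hd]
        · rcases ab with _ | ab
          · -- particle: skip the token and the following space
            simp only [Option.map_some]
            show pvLoop' ((c :: (tk ++ u)).drop ((c :: tk).length + 1)) true r
                = r ++ pvM (pvSplitSp (c :: (tk ++ u)))
            rw [hct, pvDrop_append]
            rcases hu with rfl | ⟨v, rfl⟩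
            · rw [List.drop_nil, pvLoop', List.append_nil, pvSplitSp_no_space _ hts]
              simp [pvM, pvF, hd]
            · simp only [List.drop_succ_cons, List.drop_zero]
              rw [ih v r (by simp only [List.length_cons, List.length_append] at h; omega)]
              rw [pvSplitSp_append _ hts v]
              rcases hsv : pvSplitSp v with _ | ⟨x, xs⟩
              · exact absurd hsv (pvSplitSp_ne_nil v)
              · simp [pvM, pvF, hd]
          · -- abbreviated token
            have hab : ab ≠ [] := pvAbbrevList_val_ne_nil hd
            simp only [Option.map_some]
            show pvLoop' ((c :: (tk ++ u)).drop ((c :: tk).length + 0)) false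
                  (if ab ≠ [] then r ++ ab else r)
                = r ++ pvM (pvSplitSp (c :: (tk ++ u)))
            rw [if_pos hab, hct, pvDrop_append, List.drop_zero]
            rcases hu with rfl | ⟨v, rfl⟩
            · rw [pvLoop', List.append_nil, pvSplitSp_no_space _ hts]
              simp [pvM, pvF, hd]
            · rw [pvLoop', if_pos rfl, ih v ((r ++ ab) ++ [' '])
                (by simp only [List.length_cons, List.length_append] at h; omega)]
              rw [pvSplitSp_append _ hts v]
              rcases hsv : pvSplitSp v with _ | ⟨x, xs⟩
              · exact absurd hsv (pvSplitSp_ne_nil v)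
              · simp [pvM, pvF, hd]

theorem pvLoop'_char (t : List Char) (r : List Char) :
    pvLoop' t true r = r ++ pvM (pvSplitSp t) :=
  pvLoop'_char_aux t.length t r le_rfl

-- ===== VERDICT (by name: the statement is the Claim_ definition above) =====
theorem abbrev_py_spec : Claim_equal_abbrev_py := by
  intro s _
  unfold Spec_abbrev_py abbrev_py abbrev_py_alt
  rw [pvAbbrevLoop_eq, pvLoop'_char, (pvBLoop_char _).1, List.nil_append]
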